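-- pv_equiv track=rewrite | github.com/101rror/LeetCode | 4295-count-indices-with-opposite-parity/count-indices-with-opposite-parity.py | countOppositeParity
-- ===== SOURCE A (Python) =====
-- def countOppositeParity(nums: list[int]) -> list[int]:
--     n = len(nums)
--     ans = [0] * n
--
--     even = sum(1 for x in nums if x % 2 == 0)
--     odd = n - even
--
--     for i in range(n):
--         if nums[i] % 2 == 0:
--             even -= 1
--             ans[i] = odd
--         else:
--             odd -= 1
--             ans[i] = even
--
--     return ans
-- ===== SOURCE B (Python) =====
-- def countOppositeParity(nums: list[int]) -> list[int]:
--     n = len(nums)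
--     ans = [0] * n
--     seen_even = seen_odd = 0
--     for i in range(n - 1, -1, -1):
--         if nums[i] % 2 == 0:
--             ans[i] = seen_odd
--             seen_even += 1
--         else:
--             ans[i] = seen_even
--             seen_odd += 1
--     return ans
-- ===== Notes on version B (the rewrite author's own statement) =====
-- stated objective: alternative
-- what changed: Single backward pass accumulating suffix even/odd counters instead of precomputing totals and subtracting during a forward pass.
import Mathlib
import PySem

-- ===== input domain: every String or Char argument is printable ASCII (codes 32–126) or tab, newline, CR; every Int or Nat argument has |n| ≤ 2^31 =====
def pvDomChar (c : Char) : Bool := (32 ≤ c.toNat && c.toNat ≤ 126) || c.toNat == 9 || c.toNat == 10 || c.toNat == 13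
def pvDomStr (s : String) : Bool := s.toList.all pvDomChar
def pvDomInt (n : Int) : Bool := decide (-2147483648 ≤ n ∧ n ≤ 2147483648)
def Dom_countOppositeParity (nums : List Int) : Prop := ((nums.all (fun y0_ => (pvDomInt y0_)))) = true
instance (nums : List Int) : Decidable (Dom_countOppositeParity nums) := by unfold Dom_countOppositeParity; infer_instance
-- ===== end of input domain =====

-- B replaces A's two-pass total-then-subtract scheme by a single backward pass accumulating suffix even/odd counters (alternative decomposition, same O(n) cost).


-- ===== PORT A =====
-- A: precompute total even/odd counts, forward pass subtracting as it goes.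
def pvIsEven (x : Int) : Bool := PySem.Int.mod x 2 == 0

-- even = sum(1 for x in nums if x % 2 == 0)
def pvCountEven (nums : List Int) : Int :=
  nums.foldl (fun acc x => if pvIsEven x then acc + 1 else acc) 0

-- the for-loop of A: walks nums left to right carrying the remaining even/odd counters
def pvALoop (nums : List Int) (even odd : Int) : List Int :=
  match nums with
  | [] => []
  | x :: xs =>
      if pvIsEven x then odd :: pvALoop xs (even - 1) odd
      else even :: pvALoop xs even (odd - 1)

def countOppositeParity (nums : List Int) : List Int :=
  let n : Int := nums.length
  let even := pvCountEven nums
  let odd := n - even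
  pvALoop nums even odd

-- ===== PORT B =====
-- B: one backward pass; bLoop returns (ans for the suffix, seenEven, seenOdd) after processing it
def pvBLoop (nums : List Int) : List Int × Int × Int :=
  match nums with
  | [] => ([], 0, 0)
  | x :: xs =>
      let (ans, se, so) := pvBLoop xs
      if pvIsEven x then (so :: ans, se + 1, so)
      else (se :: ans, se, so + 1)

def countOppositeParity_alt (nums : List Int) : List Int :=
  (pvBLoop nums).1

-- ===== PRECONDITION & SPEC =====
def Spec_countOppositeParity (nums : List Int) (out : List Int) : Prop := out = countOppositeParity_alt nums
instance (nums : List Int) (out : List Int) : Decidable (Spec_countOppositeParity nums out) := by unfold Spec_countOppositeParity; infer_instance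

-- ===== CLAIM (what is proved, stated in full; the proofs are below) =====
def Claim_equal_countOppositeParity : Prop := ∀ (nums : List Int), Dom_countOppositeParity nums → Spec_countOppositeParity nums (countOppositeParity nums)

-- ===== LEMMAS AND PROOFS =====
-- proof-only helpers: recursive even/odd counts
def pvCountEvenR : List Int → Int
  | [] => 0
  | x :: xs => (if pvIsEven x then 1 else 0) + pvCountEvenR xs

def pvCountOddR : List Int → Int
  | [] => 0
  | x :: xs => (if pvIsEven x then 0 else 1) + pvCountOddR xs


-- B's counters after a suffix equal the even/odd counts of that suffix
theorem pvBLoop_counts (nums : List Int) :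
    (pvBLoop nums).2.1 = pvCountEvenR nums ∧ (pvBLoop nums).2.2 = pvCountOddR nums := by
  induction nums with
  | nil => simp [pvBLoop, pvCountEvenR, pvCountOddR]
  | cons x xs ih =>
      simp only [pvBLoop, pvCountEvenR, pvCountOddR]
      by_cases h : pvIsEven x = true <;> simp [h, ih.1, ih.2] <;> ring

-- main induction: A's loop started with the suffix's exact counts equals B's answer
theorem pvLoop_eq (nums : List Int) :
    pvALoop nums (pvCountEvenR nums) (pvCountOddR nums) = (pvBLoop nums).1 := by
  induction nums with
  | nil => simp [pvALoop, pvBLoop]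
  | cons x xs ih =>
      simp only [pvALoop, pvBLoop, pvCountEvenR, pvCountOddR]
      by_cases h : pvIsEven x = true <;>
        simp [h, (pvBLoop_counts xs).1, (pvBLoop_counts xs).2, ih]

theorem pvCountEven_eq (nums : List Int) : pvCountEven nums = pvCountEvenR nums := by
  have key : ∀ (l : List Int) (a : Int),
      l.foldl (fun acc x => if pvIsEven x then acc + 1 else acc) a = a + pvCountEvenR l := by
    intro l
    induction l with
    | nil => intro a; simp [pvCountEvenR]
    | cons x xs ih =>
        intro a
        by_cases h : pvIsEven x = true <;> simp [List.foldl, pvCountEvenR, h, ih] <;> ring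
  simpa using key nums 0

theorem pvCountOdd_eq (nums : List Int) :
    (nums.length : Int) - pvCountEvenR nums = pvCountOddR nums := by
  induction nums with
  | nil => simp [pvCountEvenR, pvCountOddR]
  | cons x xs ih =>
      by_cases h : pvIsEven x = true <;>
        simp [pvCountEvenR, pvCountOddR, h] <;> omega

-- ===== VERDICT (by name: the statement is the Claim_ definition above) =====
theorem countOppositeParity_spec : Claim_equal_countOppositeParity := by
  intro nums _
  unfold Spec_countOppositeParity countOppositeParity countOppositeParity_alt
  simp only [pvCountEven_eq, pvCountOdd_eq]
  exact pvLoop_eq nums
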